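-- pv_equiv track=rewrite | github.com/ARCASSystems/FounderOS | scripts/query.py | heading_or_match
-- ===== SOURCE A (Python) =====
-- def heading_or_match(text: str, tokens: set[str]) -> str:
--     for line in text.splitlines():
--         stripped = line.strip()
--         if stripped.startswith("#"):
--             return stripped.lstrip("# ")[:140]
--     for line in text.splitlines():
--         low = line.lower()
--         if any(t in low for t in tokens):
--             return line.strip()[:140]
--     return "Relevant OS node"
-- ===== SOURCE B (Python) =====
-- def heading_or_match(text: str, tokens: set[str]) -> str:
--     fallback = None
--     for line in text.splitlines():
--         stripped = line.strip()
--         if stripped.startswith("#"):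
--             return stripped.lstrip("# ")[:140]
--         if fallback is None:
--             low = line.lower()
--             if any(t in low for t in tokens):
--                 fallback = stripped[:140]
--     return fallback if fallback is not None else "Relevant OS node"
-- ===== Notes on version B (the rewrite author's own statement) =====
-- stated objective: alternative
-- what changed: A scans text.splitlines() twice (a headings pass, then a token pass); B makes a single pass that returns a heading on sight and remembers the first token-matching line as a fallback.
import Mathlib
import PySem

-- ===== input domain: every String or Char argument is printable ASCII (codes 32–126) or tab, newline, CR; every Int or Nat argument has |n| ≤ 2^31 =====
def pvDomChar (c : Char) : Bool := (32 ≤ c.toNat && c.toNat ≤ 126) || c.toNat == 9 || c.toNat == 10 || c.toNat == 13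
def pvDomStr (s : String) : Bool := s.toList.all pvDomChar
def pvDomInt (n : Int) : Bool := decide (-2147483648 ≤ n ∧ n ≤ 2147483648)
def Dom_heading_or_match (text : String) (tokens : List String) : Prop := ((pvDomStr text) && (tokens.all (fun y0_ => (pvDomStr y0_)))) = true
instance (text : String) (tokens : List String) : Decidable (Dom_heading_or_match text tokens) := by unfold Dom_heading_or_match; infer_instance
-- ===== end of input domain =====

-- B folds A's two scans of text.splitlines() into ONE pass that returns a heading on
-- sight and remembers the first token-matching line as a fallback (objective: alternative).

-- ===== PORT A =====
-- exact port of s.lstrip("# "): drop leading characters belonging to the set {'#', ' '}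
def pvLstripHashSpace (cs : List Char) : List Char :=
  cs.dropWhile (fun c => c == '#' || c == ' ')

-- the heading value A returns for a heading line: stripped.lstrip("# ")[:140]
def pvHeadingVal (stripped : String) : String :=
  String.ofList (PySem.List.slice (pvLstripHashSpace stripped.toList) none (some 140))

-- A's first loop: first line whose stripped form starts with '#'
def pvLoopA1 : List String → Option String
  | [] => none
  | l :: rest =>
    let stripped := PySem.Str.strip l
    if PySem.Str.startswith stripped "#" then some (pvHeadingVal stripped)
    else pvLoopA1 rest

-- A's second loop: first line containing any token (lower-cased), else the default
def pvLoopA2 (tokens : List String) : List String → String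
  | [] => "Relevant OS node"
  | l :: rest =>
    let low := PySem.Str.lower l
    if tokens.any (fun t => PySem.Str.isIn t low) then
      PySem.Str.slice (PySem.Str.strip l) none (some 140)
    else pvLoopA2 tokens rest

def heading_or_match (text : String) (tokens : List String) : String :=
  match pvLoopA1 (PySem.Str.splitlines text) with
  | some r => r
  | none => pvLoopA2 tokens (PySem.Str.splitlines text)

-- ===== PORT B =====
-- B's single loop: return on a heading immediately, remember the first token match
def pvLoopB (tokens : List String) (fallback : Option String) : List String → String
  | [] => fallback.getD "Relevant OS node"
  | l :: rest =>
    let stripped := PySem.Str.strip l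
    if PySem.Str.startswith stripped "#" then pvHeadingVal stripped
    else if fallback.isNone &&
            tokens.any (fun t => PySem.Str.isIn t (PySem.Str.lower l)) then
      pvLoopB tokens (some (PySem.Str.slice stripped none (some 140))) rest
    else pvLoopB tokens fallback rest

def heading_or_match_alt (text : String) (tokens : List String) : String :=
  pvLoopB tokens none (PySem.Str.splitlines text)

-- ===== PRECONDITION & SPEC =====
def Spec_heading_or_match (text : String) (tokens : List String) (out : String) : Prop := out = heading_or_match_alt text tokens
instance (text : String) (tokens : List String) (out : String) : Decidable (Spec_heading_or_match text tokens out) := by unfold Spec_heading_or_match; infer_instance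

-- ===== CLAIM (what is proved, stated in full; the proofs are below) =====
def Claim_equal_heading_or_match : Prop := ∀ (text : String) (tokens : List String), Dom_heading_or_match text tokens → Spec_heading_or_match text tokens (heading_or_match text tokens)

-- ===== LEMMAS AND PROOFS =====
-- the one-pass loop equals: first heading if any, else the remembered fallback, else A's second loop
theorem pvLoopB_eq (tokens : List String) (lines : List String) (fb : Option String) :
    pvLoopB tokens fb lines =
      match pvLoopA1 lines with
      | some r => r
      | none =>
        match fb with
        | some f => f
        | none => pvLoopA2 tokens lines := by
  induction lines generalizing fb with
  | nil => cases fb <;> simp [pvLoopB, pvLoopA1, pvLoopA2]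
  | cons l rest ih =>
    cases fb with
    | some f =>
      simp only [pvLoopB, pvLoopA1]
      by_cases hh : PySem.Chars.startswith (PySem.Chars.strip l.toList) ['#'] = true
      · simp [hh]
      · simp [hh, ih]
    | none =>
      simp only [pvLoopB, pvLoopA1, pvLoopA2]
      by_cases hh : PySem.Chars.startswith (PySem.Chars.strip l.toList) ['#'] = true
      · simp [hh]
      · by_cases ht : ∃ x ∈ tokens, PySem.Chars.isIn x.toList (PySem.Chars.lower l.toList) = true
        · simp [hh, ht, ih]
        · simp [hh, ht, ih]

-- ===== VERDICT (by name: the statement is the Claim_ definition above) =====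
theorem heading_or_match_spec : Claim_equal_heading_or_match := by
  intro text tokens _
  unfold Spec_heading_or_match heading_or_match heading_or_match_alt
  rw [pvLoopB_eq]
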